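-- pv_equiv track=rewrite | github.com/ag502/algorithm | Problem/BOJ_1790_수 이어 쓰기 2/main.py | get_number_of_digit
-- ===== SOURCE A (Python) =====
-- def get_number_of_digit(number, number_length):
--     number_of_digit = 0
--     for i in range(1, number_length + 1):
--         if i == number_length:
--             number_of_digit += (number - 10 ** (i - 1) + 1) * i
--             break
--         number_of_digit += (10 ** i - 10 ** (i - 1)) * i
--
--     return number_of_digit
-- ===== SOURCE B (Python) =====
-- def get_number_of_digit(number, number_length):
--     if number_length < 1:
--         return 0
--     return (number + 1) * number_length - (10 ** number_length - 1) // 9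
-- ===== Notes on version B (the rewrite author's own statement) =====
-- stated objective: faster
-- what changed: Replaced the per-digit-length summation loop with a single closed-form arithmetic expression (number + 1) * L - (10**L - 1) // 9 (the subtrahend is the repunit of length L).
import Mathlib
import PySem

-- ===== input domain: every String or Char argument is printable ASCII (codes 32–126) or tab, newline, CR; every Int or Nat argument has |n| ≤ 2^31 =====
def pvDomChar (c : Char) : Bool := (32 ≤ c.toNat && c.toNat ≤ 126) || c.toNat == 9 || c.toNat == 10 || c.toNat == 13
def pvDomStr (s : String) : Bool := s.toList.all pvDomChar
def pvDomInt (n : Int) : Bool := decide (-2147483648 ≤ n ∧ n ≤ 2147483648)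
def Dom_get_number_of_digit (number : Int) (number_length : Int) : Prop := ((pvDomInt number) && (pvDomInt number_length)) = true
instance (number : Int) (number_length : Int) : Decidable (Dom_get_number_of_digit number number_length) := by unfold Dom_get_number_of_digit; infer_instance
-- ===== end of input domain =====

-- B replaces A's per-length summation loop with the equivalent closed form
-- (number + 1) * L - (10^L - 1) // 9; objective: simpler.

-- ===== PORT A =====
-- the for-loop with its break, as recursion over the range list; acc = number_of_digit
def pvLoopA (number : Int) (bound : Int) : List Int → Int → Int
  | [], acc => acc
  | i :: rest, acc =>
    if i = bound then acc + (number - 10 ^ (i - 1).toNat + 1) * i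
    else pvLoopA number bound rest (acc + (10 ^ i.toNat - 10 ^ (i - 1).toNat) * i)

def get_number_of_digit (number : Int) (number_length : Int) : Int :=
  pvLoopA number number_length (PySem.List.pyRange 1 (number_length + 1) 1) 0

-- ===== PORT B =====
def get_number_of_digit_alt (number : Int) (number_length : Int) : Int :=
  if number_length < 1 then 0
  else (number + 1) * number_length - PySem.Int.floordiv (10 ^ number_length.toNat - 1) 9

-- ===== PRECONDITION & SPEC =====
def Spec_get_number_of_digit (number : Int) (number_length : Int) (out : Int) : Prop := out = get_number_of_digit_alt number number_length
instance (number : Int) (number_length : Int) (out : Int) : Decidable (Spec_get_number_of_digit number number_length out) := by unfold Spec_get_number_of_digit; infer_instance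

-- ===== CLAIM (what is proved, stated in full; the proofs are below) =====
def Claim_equal_get_number_of_digit : Prop := ∀ (number : Int) (number_length : Int), Dom_get_number_of_digit number number_length → Spec_get_number_of_digit number number_length (get_number_of_digit number number_length)

-- ===== LEMMAS AND PROOFS =====

-- repunit m = (10^m - 1) / 9, defined recursively
def pvRepunit : Nat → Int
  | 0 => 0
  | m + 1 => 10 * pvRepunit m + 1

theorem pv_nine_mul_repunit (m : Nat) : 9 * pvRepunit m = 10 ^ m - 1 := by
  induction m with
  | zero => simp [pvRepunit]
  | succ m ih => rw [pvRepunit, pow_succ]; linarith [ih]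

theorem pv_repunit_succ (m : Nat) : pvRepunit (m + 1) = pvRepunit m + 10 ^ m := by
  have h := pv_nine_mul_repunit m
  simp [pvRepunit]; omega

theorem pv_floordiv_repunit (m : Nat) :
    PySem.Int.floordiv (10 ^ m - 1) 9 = pvRepunit m := by
  rw [PySem.Int.floordiv_eq_ediv_of_pos (by norm_num), ← pv_nine_mul_repunit m]
  exact Int.mul_ediv_cancel_left _ (by norm_num)

-- evaluation of A's loop: bound = j+1+d, remaining indices j+1 .. j+1+d
theorem pv_loopA_eval (number : Int) (d : Nat) : ∀ (j : Nat) (acc : Int),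
    pvLoopA number ((j : Int) + 1 + d)
      (PySem.List.pyRange ((j : Int) + 1) ((j : Int) + 1 + d + 1) 1) acc
    = acc + (number + 1) * ((j : Int) + 1 + d) - pvRepunit (j + 1 + d)
        + pvRepunit j - (j : Int) * 10 ^ j := by
  induction d with
  | zero =>
    intro j acc
    rw [PySem.List.pyRange_one_cons (by omega), PySem.List.pyRange_one_eq_nil (by omega)]
    have h1 : ((j : Int) + 1 - 1).toNat = j := by omega
    have h2 : pvRepunit (j + 1) = pvRepunit j + 10 ^ j := pv_repunit_succ j
    simp only [pvLoopA]
    rw [if_pos (show ((j : Int) + 1) = (j : Int) + 1 + ((0 : Nat) : Int) from by push_cast; ring)]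
    push_cast [h1, h2]
    ring
  | succ d ih =>
    intro j acc
    rw [PySem.List.pyRange_one_cons (by omega)]
    have hne : ¬ ((j : Int) + 1 = (j : Int) + 1 + (d + 1 : Nat)) := by push_cast; omega
    simp only [pvLoopA, if_neg hne]
    have harg : (j : Int) + 1 + 1 = ((j + 1 : Nat) : Int) + 1 := by push_cast; ring
    have hbnd : (j : Int) + 1 + ((d + 1 : Nat) : Int) = ((j + 1 : Nat) : Int) + 1 + (d : Int) := by
      push_cast; ring
    have hbnd2 : (j : Int) + 1 + ((d + 1 : Nat) : Int) + 1 = ((j + 1 : Nat) : Int) + 1 + (d : Int) + 1 := by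
      push_cast; ring
    rw [show ((j : Int) + 1 - 1).toNat = j from by omega,
        show ((j : Int) + 1).toNat = j + 1 from by omega,
        hbnd2, hbnd, harg, ih (j + 1)]
    have h2 : pvRepunit (j + 1) = pvRepunit j + 10 ^ j := pv_repunit_succ j
    have h3 : j + 1 + 1 + d = j + 1 + (d + 1) := by omega
    rw [h3] at *
    push_cast [h2, pow_succ]
    ring

-- ===== VERDICT (by name: the statement is the Claim_ definition above) =====
theorem get_number_of_digit_spec : Claim_equal_get_number_of_digit := by
  intro number number_length _
  unfold Spec_get_number_of_digit get_number_of_digit get_number_of_digit_alt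
  by_cases hL : number_length < 1
  · rw [PySem.List.pyRange_one_eq_nil (by omega)]
    simp [pvLoopA, if_pos hL]
  · push Not at hL
    obtain ⟨m, hm⟩ : ∃ m : Nat, number_length = (m : Int) + 1 :=
      ⟨(number_length - 1).toNat, by omega⟩
    subst hm
    have h0 : (m : Int) + 1 = ((0 : Nat) : Int) + 1 + (m : Int) := by push_cast; ring
    rw [if_neg (by omega), show ((m : Int) + 1).toNat = m + 1 from by omega,
        pv_floordiv_repunit (m + 1)]
    calc pvLoopA number ((m : Int) + 1) (PySem.List.pyRange 1 ((m : Int) + 1 + 1) 1) 0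
        = pvLoopA number (((0 : Nat) : Int) + 1 + m)
            (PySem.List.pyRange (((0 : Nat) : Int) + 1) (((0 : Nat) : Int) + 1 + m + 1) 1) 0 := by
          rw [← h0]; norm_num
      _ = (number + 1) * ((m : Int) + 1) - pvRepunit (m + 1) := by
          rw [pv_loopA_eval number m 0 0, show 0 + 1 + m = m + 1 from by omega]
          simp only [pvRepunit, Nat.cast_zero, zero_mul, sub_zero]
          ring
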